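-- pv_equiv track=rewrite | github.com/aphoticshaman/HungryOrca | orcaswordv7_cell1_infrastructure.py | object_perimeter
-- ===== SOURCE A (Python) =====
-- from typing import List, Dict, Tuple, Optional, Callable
-- from collections import Counter, defaultdict
--
-- Grid = List[List[int]]
--
-- def is_border(grid: Grid, i: int, j: int) -> bool:
--     """Check if pixel is on border"""
--     return i in (0, len(grid)-1) or j in (0, len(grid[0])-1)
--
-- def most_common_color(grid: Grid) -> int:
--     """Get most frequent color"""
--     flat = [cell for row in grid for cell in row]
--     return Counter(flat).most_common(1)[0][0] if flat else 0
--
-- def background_color(grid: Grid) -> int: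
--     """Detect background (most common color)"""
--     return most_common_color(grid)
--
-- def object_perimeter(grid: Grid, bg: Optional[int] = None) -> int:
--     """Count border pixels"""
--     if bg is None:
--         bg = background_color(grid)
--     count = 0
--     for i in range(len(grid)):
--         for j in range(len(grid[0])):
--             if grid[i][j] != bg and is_border(grid, i, j):
--                 count += 1
--     return count
-- ===== SOURCE B (Python) =====
-- from typing import List, Optional
-- from collections import Counter
--
-- Grid = List[List[int]]
--
-- def _background(grid: Grid) -> int:
--     """Detect background (most common color)"""
--     flat = [cell for row in grid for cell in row]
--     return Counter(flat).most_common(1)[0][0] if flat else 0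
--
-- def object_perimeter(grid: Grid, bg: Optional[int] = None) -> int:
--     """Count non-background pixels on the grid border, touching only the four edges."""
--     if bg is None:
--         bg = _background(grid)
--     if not grid:
--         return 0
--     n = len(grid)
--     m = len(grid[0])
--     if m == 0:
--         return 0
--     total = sum(1 for v in grid[0][:m] if v != bg)
--     if n > 1:
--         total += sum(1 for v in grid[n-1][:m] if v != bg)
--         for row in grid[1:n-1]:
--             if row[0] != bg:
--                 total += 1
--             if m > 1 and row[m-1] != bg:
--                 total += 1
--     return total
-- ===== Notes on version B (the rewrite author's own statement) =====
-- stated objective: faster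
-- what changed: B counts non-background pixels by walking only the four border edges (first row, last row, and the two edge columns of the middle rows) instead of scanning every cell of the grid and testing is_border.
import Mathlib
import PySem

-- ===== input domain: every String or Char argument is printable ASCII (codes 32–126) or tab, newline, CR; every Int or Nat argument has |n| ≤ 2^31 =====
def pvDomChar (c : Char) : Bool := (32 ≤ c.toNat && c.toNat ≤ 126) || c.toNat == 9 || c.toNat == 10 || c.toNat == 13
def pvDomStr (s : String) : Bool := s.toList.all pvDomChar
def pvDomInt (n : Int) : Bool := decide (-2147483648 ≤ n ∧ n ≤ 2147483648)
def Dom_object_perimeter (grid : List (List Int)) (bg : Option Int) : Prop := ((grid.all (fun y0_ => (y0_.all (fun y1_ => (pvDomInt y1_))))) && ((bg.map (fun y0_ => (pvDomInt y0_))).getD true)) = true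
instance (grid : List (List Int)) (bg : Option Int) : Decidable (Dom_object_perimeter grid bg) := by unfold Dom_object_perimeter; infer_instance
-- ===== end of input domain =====

-- B iterates only the four border edges instead of scanning the whole grid (asymptotically
-- fewer cells touched when bg is given); the background-detection helper is unchanged.

-- ===== PORT A =====
-- grid[0] in is_border / the range bound is only reached with grid nonempty, where headD [] is exact.
def is_border (grid : List (List Int)) (i j : Int) : Bool :=
  (i == 0 || i == (grid.length : Int) - 1) || (j == 0 || j == ((grid.headD []).length : Int) - 1)

-- Counter(flat).most_common(1)[0][0]: most_common = sorted(items, key=count, reverse=True) (stable); flat ≠ [] ⇒ items ≠ [], so headD is exact.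
def most_common_color (grid : List (List Int)) : Int :=
  let flat := grid.flatMap (fun row => row)
  if flat ≠ [] then
    ((PySem.List.sorted (PySem.Dict.counter flat).items (fun kv => kv.2) true).headD (0, 0)).1
  else 0

def background_color (grid : List (List Int)) : Int := most_common_color grid

def object_perimeter (grid : List (List Int)) (bg : Option Int) : Int :=
  let bgv := match bg with
    | none => background_color grid
    | some b => b
  (PySem.List.pyRange 0 (grid.length : Int) 1).foldl (fun count i =>
    (PySem.List.pyRange 0 ((grid.headD []).length : Int) 1).foldl (fun count j =>
      if (PySem.List.pyGetD (PySem.List.pyGetD grid i []) j 0 != bgv) && is_border grid i j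
      then count + 1 else count) count) 0

-- ===== PORT B =====
-- Source B's _background (same detection as A's helper; the algorithmic change is the main loop).
def pv_background (grid : List (List Int)) : Int :=
  let flat := grid.flatMap (fun row => row)
  if flat ≠ [] then
    ((PySem.List.sorted (PySem.Dict.counter flat).items (fun kv => kv.2) true).headD (0, 0)).1
  else 0

-- sum(1 for v in xs if v != bg)
def pv_countNe (bg : Int) (xs : List Int) : Int :=
  xs.foldl (fun acc v => if v != bg then acc + 1 else acc) 0

def object_perimeter_alt (grid : List (List Int)) (bg : Option Int) : Int :=
  let bgv := match bg with
    | none => pv_background grid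
    | some b => b
  if grid = [] then 0
  else
    let n := grid.length
    let m := (grid.headD []).length
    if m = 0 then 0
    else
      let total := pv_countNe bgv (PySem.List.slice (grid.headD []) none (some (m : Int)))
      if 1 < n then
        let total := total + pv_countNe bgv
          (PySem.List.slice (PySem.List.pyGetD grid ((n : Int) - 1) []) none (some (m : Int)))
        (PySem.List.slice grid (some 1) (some ((n : Int) - 1))).foldl (fun total row =>
          let total := if PySem.List.pyGetD row 0 0 != bgv then total + 1 else total
          if 1 < m ∧ PySem.List.pyGetD row ((m : Int) - 1) 0 != bgv then total + 1 else total)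
          total
      else total

-- ===== PRECONDITION & SPEC =====
-- Pre_ excludes exactly the ragged grids on which the Python A raises IndexError:
-- those with some row shorter than the first row (A indexes every row at all j < len(grid[0])).
def Pre_object_perimeter (grid : List (List Int)) (bg : Option Int) : Prop :=
  ∀ row ∈ grid, (grid.headD []).length ≤ row.length
instance (grid : List (List Int)) (bg : Option Int) : Decidable (Pre_object_perimeter grid bg) := by
  unfold Pre_object_perimeter; infer_instance

def pvWitness_object_perimeter : List (List Int) × Option Int := ([[1, 2], [3, 4]], some 0)

def Spec_object_perimeter (grid : List (List Int)) (bg : Option Int) (out : Int) : Prop := out = object_perimeter_alt grid bg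
instance (grid : List (List Int)) (bg : Option Int) (out : Int) : Decidable (Spec_object_perimeter grid bg out) := by unfold Spec_object_perimeter; infer_instance

-- ===== CLAIM (what is proved, stated in full; the proofs are below) =====
def Claim_equal_object_perimeter : Prop := ∀ (grid : List (List Int)) (bg : Option Int), Dom_object_perimeter grid bg → Pre_object_perimeter grid bg → Spec_object_perimeter grid bg (object_perimeter grid bg)

-- ===== LEMMAS AND PROOFS =====

-- [f(j) for j in range(a, a+m)] over xs[j] is the segment xs[a : a+m]
lemma map_pyGetD_seg {α : Type} (xs : List α) (d : α) (a m : Nat) (h : a + m ≤ xs.length) :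
    (PySem.List.pyRange (a : Int) ((a : Int) + (m : Int)) 1).map
      (fun j => PySem.List.pyGetD xs j d) = (xs.drop a).take m := by
  induction m with
  | zero =>
      simp [PySem.List.pyRange_one_eq_nil]
  | succ k ih =>
      have hk : a + k < xs.length := by omega
      have hsplit : PySem.List.pyRange (a : Int) ((a : Int) + ((k : Nat) + 1 : Nat)) 1
          = PySem.List.pyRange (a : Int) ((a : Int) + (k : Int)) 1 ++ [(a : Int) + (k : Int)] := by
        have := PySem.List.pyRange_one_succ_right (a := (a : Int)) (b := (a : Int) + (k : Int))
          (by omega)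
        rw [show ((a : Int) + ((k : Nat) + 1 : Nat) : Int) = ((a : Int) + (k : Int)) + 1 by
          push_cast; ring]
        exact this
      rw [hsplit, List.map_append, ih (by omega)]
      have hlast : PySem.List.pyGetD xs ((a : Int) + (k : Int)) d = xs[a + k] := by
        rw [show ((a : Int) + (k : Int)) = ((a + k : Nat) : Int) by push_cast; ring]
        rw [PySem.List.pyGetD_natCast]
        exact List.getD_eq_getElem xs d hk
      rw [List.take_add_one]
      simp [hlast, List.getElem?_drop, List.getElem?_eq_getElem hk]

-- counting j == b-1 over range(a, b)
lemma countP_pyRange_last (q : Int → Bool) (a b : Int) :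
    (PySem.List.pyRange a b 1).countP (fun j => q j && (j == b - 1))
      = if a ≤ b - 1 ∧ q (b - 1) then 1 else 0 := by
  by_cases hab : a ≤ b - 1
  · have hsplit : PySem.List.pyRange a b 1 = PySem.List.pyRange a (b - 1) 1 ++ [b - 1] := by
      have := PySem.List.pyRange_one_succ_right (a := a) (b := b - 1) hab
      rw [show b - 1 + 1 = b by ring] at this
      exact this
    rw [hsplit, List.countP_append]
    have h0 : (PySem.List.pyRange a (b - 1) 1).countP (fun j => q j && (j == b - 1)) = 0 := by
      apply List.countP_eq_zero.2
      intro j hj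
      have := (PySem.List.mem_pyRange_one).1 hj
      simp only [Bool.and_eq_true, beq_iff_eq]
      omega
    rw [h0]
    by_cases hq : q (b - 1) <;> simp [hq, hab]
  · have : PySem.List.pyRange a b 1 = [] := PySem.List.pyRange_one_eq_nil (by omega)
    simp [this, hab]

-- sum(1 for v in xs if v != bg) counts the ≠-bg entries
lemma pv_countNe_eq (bg : Int) (xs : List Int) :
    pv_countNe bg xs = (xs.countP (fun v => v != bg) : Int) := by
  unfold pv_countNe
  rw [PySem.List.foldl_if_add_one]
  ring

-- counting non-bg entries of xs[0:m] through indices, m ≤ len xs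
lemma countP_range_row (bgv : Int) (row : List Int) (m : Nat) (h : m ≤ row.length) :
    ((PySem.List.pyRange 0 (m : Int) 1).countP
        (fun j => PySem.List.pyGetD row j 0 != bgv) : Int)
      = pv_countNe bgv (row.take m) := by
  rw [pv_countNe_eq]
  have hmap := map_pyGetD_seg row 0 0 m (by omega)
  simp only [Nat.cast_zero, zero_add, List.drop_zero] at hmap
  rw [← hmap, List.countP_map]
  rfl

-- the per-row contribution of a middle row
def pv_edge (bgv : Int) (m : Nat) (row : List Int) : Int :=
  (if PySem.List.pyGetD row 0 0 != bgv then 1 else 0)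
    + (if 1 < m ∧ PySem.List.pyGetD row ((m : Int) - 1) 0 != bgv then 1 else 0)

-- A's inner loop on a middle row counts exactly the two edge cells
lemma countP_middle (bgv : Int) (m : Nat) (hm : 0 < m) (row : List Int) :
    ((PySem.List.pyRange 0 (m : Int) 1).countP
        (fun j => (PySem.List.pyGetD row j 0 != bgv) && ((j == 0) || (j == (m : Int) - 1))) : Int)
      = pv_edge bgv m row := by
  rw [PySem.List.pyRange_one_cons (by exact_mod_cast hm)]
  rw [List.countP_cons]
  have htail : (PySem.List.pyRange (0 + 1) (m : Int) 1).countP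
      (fun j => (PySem.List.pyGetD row j 0 != bgv) && ((j == 0) || (j == (m : Int) - 1)))
      = (PySem.List.pyRange 1 (m : Int) 1).countP
      (fun j => (PySem.List.pyGetD row j 0 != bgv) && (j == (m : Int) - 1)) := by
    rw [show (0 + 1 : Int) = 1 by ring]
    apply List.countP_congr
    intro j hj
    have := (PySem.List.mem_pyRange_one).1 hj
    have hj0 : (j == (0 : Int)) = false := by simp; omega
    simp [hj0]
  rw [htail, countP_pyRange_last]
  unfold pv_edge
  by_cases h1 : PySem.List.pyGetD row 0 0 != bgv <;>
    by_cases h2 : PySem.List.pyGetD row ((m : Int) - 1) 0 != bgv <;>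
      by_cases h3 : 1 < m <;>
        simp [h1, h2, h3]

-- B's middle-rows loop body adds pv_edge
lemma alt_middle_step (bgv : Int) (m : Nat) (total : Int) (row : List Int) :
    (let t := if PySem.List.pyGetD row 0 0 != bgv then total + 1 else total
     if 1 < m ∧ PySem.List.pyGetD row ((m : Int) - 1) 0 != bgv then t + 1 else t)
      = total + pv_edge bgv m row := by
  unfold pv_edge
  split_ifs <;> ring

-- core equality with an explicit background value
lemma object_perimeter_core (grid : List (List Int)) (bgv : Int)
    (hpre : ∀ row ∈ grid, (grid.headD []).length ≤ row.length) :
    object_perimeter grid (some bgv) = object_perimeter_alt grid (some bgv) := by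
  rcases grid with _ | ⟨r0, rest⟩
  · simp [object_perimeter, object_perimeter_alt, PySem.List.pyRange_one_eq_nil]
  set grid := r0 :: rest with hgrid
  have hne : grid ≠ [] := by simp [hgrid]
  set n : Nat := grid.length with hn
  set m : Nat := (grid.headD []).length with hm
  have hhead : grid.headD [] = r0 := by simp [hgrid]
  -- A as a sum of per-row counts
  have hA : object_perimeter grid (some bgv)
      = ((PySem.List.pyRange 0 (n : Int) 1).map (fun i =>
          ((PySem.List.pyRange 0 (m : Int) 1).countP (fun j =>
            (PySem.List.pyGetD (PySem.List.pyGetD grid i []) j 0 != bgv)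
              && is_border grid i j) : Int))).sum := by
    simp only [object_perimeter, PySem.List.foldl_if_add_one, PySem.List.foldl_add, zero_add,
      ← hn, ← hm]
  by_cases hm0 : m = 0
  · -- no columns: both sides are 0
    have hB : object_perimeter_alt grid (some bgv) = 0 := by
      simp only [object_perimeter_alt]
      rw [if_neg hne, if_pos (show (grid.headD []).length = 0 by rw [← hm]; exact hm0)]
    rw [hA, hB, hm0]
    simp [PySem.List.pyRange_one_eq_nil]
  have hmpos : 0 < m := Nat.pos_of_ne_zero hm0
  -- border rows (i = 0 and i = n-1) count their first m cells
  have hborder0 : ∀ j, is_border grid 0 j = true := by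
    intro j; simp [is_border]
  have hcnt0 : ((PySem.List.pyRange 0 (m : Int) 1).countP (fun j =>
      (PySem.List.pyGetD (PySem.List.pyGetD grid 0 []) j 0 != bgv)
        && is_border grid 0 j) : Int) = pv_countNe bgv (r0.take m) := by
    have : (PySem.List.pyRange 0 (m : Int) 1).countP (fun j =>
        (PySem.List.pyGetD (PySem.List.pyGetD grid 0 []) j 0 != bgv) && is_border grid 0 j)
        = (PySem.List.pyRange 0 (m : Int) 1).countP (fun j =>
          (PySem.List.pyGetD r0 j 0 != bgv)) := by
      apply List.countP_congr
      intro j _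
      have hg0 : PySem.List.pyGetD grid 0 [] = r0 := by
        rw [hgrid]; exact PySem.List.pyGetD_zero_cons r0 rest []
      rw [hg0, hborder0 j, Bool.and_true]
    rw [this]
    exact countP_range_row bgv r0 m (by have := hpre r0 (by simp [hgrid]); simpa [hhead] using this)
  by_cases hn1 : n = 1
  · -- single row
    have hrest : rest = [] := by
      have : rest.length = 0 := by simp [hgrid] at hn; omega
      exact List.length_eq_zero_iff.1 this
    subst hrest
    have hB : object_perimeter_alt grid (some bgv)
        = pv_countNe bgv (PySem.List.slice (grid.headD []) none (some (m : Int))) := by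
      simp only [object_perimeter_alt]
      rw [if_neg hne, if_neg (show ¬ (grid.headD []).length = 0 by rw [← hm]; exact hm0),
        if_neg (show ¬ 1 < grid.length by rw [← hn]; omega)]
    rw [hA, hB]
    have : PySem.List.pyRange 0 (n : Int) 1 = [0] := by
      rw [hn1]; exact PySem.List.pyRange_one_singleton 0
    rw [this]
    simp only [List.map_cons, List.map_nil, List.sum_cons, List.sum_nil, add_zero]
    rw [hcnt0, hhead, PySem.List.slice_to_natCast]
  -- n ≥ 2
  have hn2 : 2 ≤ n := by
    have : 1 ≤ n := by simp [hgrid, hn]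
    omega
  -- last row
  have hlast_mem : PySem.List.pyGetD grid ((n : Int) - 1) [] ∈ grid := by
    apply PySem.List.pyGetD_mem
    simp only [PySem.Raise.InRange]
    constructor <;> [push_cast; push_cast] <;> omega
  have hcntN : ((PySem.List.pyRange 0 (m : Int) 1).countP (fun j =>
      (PySem.List.pyGetD (PySem.List.pyGetD grid ((n : Int) - 1) []) j 0 != bgv)
        && is_border grid ((n : Int) - 1) j) : Int)
      = pv_countNe bgv ((PySem.List.pyGetD grid ((n : Int) - 1) []).take m) := by
    have hb : ∀ j, is_border grid ((n : Int) - 1) j = true := by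
      intro j; simp [is_border, ← hn]
    have : (PySem.List.pyRange 0 (m : Int) 1).countP (fun j =>
        (PySem.List.pyGetD (PySem.List.pyGetD grid ((n : Int) - 1) []) j 0 != bgv)
          && is_border grid ((n : Int) - 1) j)
        = (PySem.List.pyRange 0 (m : Int) 1).countP (fun j =>
          (PySem.List.pyGetD (PySem.List.pyGetD grid ((n : Int) - 1) []) j 0 != bgv)) := by
      apply List.countP_congr
      intro j _
      simp [hb j]
    rw [this]
    exact countP_range_row bgv _ m (by
      have := hpre _ hlast_mem
      simpa [hhead] using this)
  -- middle rows
  have hmid : ∀ i ∈ PySem.List.pyRange 1 ((n : Int) - 1) 1,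
      ((PySem.List.pyRange 0 (m : Int) 1).countP (fun j =>
        (PySem.List.pyGetD (PySem.List.pyGetD grid i []) j 0 != bgv)
          && is_border grid i j) : Int) = pv_edge bgv m (PySem.List.pyGetD grid i []) := by
    intro i hi
    have hbi := (PySem.List.mem_pyRange_one).1 hi
    have hib : ∀ j, is_border grid i j = ((j == 0) || (j == (m : Int) - 1)) := by
      intro j
      have h1 : (i == (0 : Int)) = false := by simp; omega
      have h2 : (i == ((grid.length : Int) - 1)) = false := by simp [← hn]; omega
      simp only [is_border, h1, h2, Bool.false_or, ← hm]
    have : (PySem.List.pyRange 0 (m : Int) 1).countP (fun j =>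
        (PySem.List.pyGetD (PySem.List.pyGetD grid i []) j 0 != bgv) && is_border grid i j)
        = (PySem.List.pyRange 0 (m : Int) 1).countP (fun j =>
          (PySem.List.pyGetD (PySem.List.pyGetD grid i []) j 0 != bgv)
            && ((j == 0) || (j == (m : Int) - 1))) := by
      apply List.countP_congr
      intro j _
      rw [hib j]
    rw [this]
    exact countP_middle bgv m hmpos _
  -- assemble A
  have hsplitRange : PySem.List.pyRange 0 (n : Int) 1
      = 0 :: (PySem.List.pyRange 1 ((n : Int) - 1) 1 ++ [(n : Int) - 1]) := by
    rw [PySem.List.pyRange_one_cons (by exact_mod_cast by omega : (0:Int) < (n : Int))]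
    rw [show (0 + 1 : Int) = 1 by ring]
    rw [PySem.List.pyRange_one_append 1 ((n : Int) - 1) (n : Int) (by omega) (by omega)]
    have hsing : PySem.List.pyRange ((n : Int) - 1) (n : Int) 1 = [(n : Int) - 1] := by
      have h := PySem.List.pyRange_one_singleton ((n : Int) - 1)
      rw [show (n : Int) - 1 + 1 = (n : Int) by ring] at h
      exact h
    rw [hsing]
  have hAsum : object_perimeter grid (some bgv)
      = pv_countNe bgv (r0.take m)
        + ((PySem.List.pyRange 1 ((n : Int) - 1) 1).map (fun i =>
            pv_edge bgv m (PySem.List.pyGetD grid i []))).sum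
        + pv_countNe bgv ((PySem.List.pyGetD grid ((n : Int) - 1) []).take m) := by
    rw [hA, hsplitRange]
    simp only [List.map_cons, List.map_append, List.sum_cons, List.sum_append, List.map_nil,
      List.sum_nil, add_zero]
    rw [hcnt0, hcntN]
    rw [List.map_congr_left hmid]
    ring
  -- middle rows as a list segment
  have hmidlist : (PySem.List.pyRange 1 ((n : Int) - 1) 1).map
      (fun i => PySem.List.pyGetD grid i []) = (grid.drop 1).take (n - 2) := by
    have := map_pyGetD_seg grid [] 1 (n - 2) (by omega)
    rw [show ((1 : Nat) : Int) + ((n - 2 : Nat) : Int) = (n : Int) - 1 by omega]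
      at this
    exact_mod_cast this
  -- assemble B
  have hB : object_perimeter_alt grid (some bgv)
      = ((grid.drop 1).take (n - 2)).foldl (fun total row =>
          let t := if PySem.List.pyGetD row 0 0 != bgv then total + 1 else total
          if 1 < m ∧ PySem.List.pyGetD row ((m : Int) - 1) 0 != bgv then t + 1 else t)
        (pv_countNe bgv (r0.take m)
          + pv_countNe bgv ((PySem.List.pyGetD grid ((n : Int) - 1) []).take m)) := by
    have hslice : PySem.List.slice grid (some 1) (some ((n : Int) - 1))
        = (grid.drop 1).take (n - 2) := by
      rw [show ((n : Int) - 1) = ((n - 1 : Nat) : Int) by omega]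
      rw [show ((1 : Int)) = ((1 : Nat) : Int) by norm_num]
      rw [PySem.List.slice_natCast]
      congr 1
    have hsliceLast : PySem.List.slice (PySem.List.pyGetD grid ((n : Int) - 1) []) none
        (some (m : Int)) = (PySem.List.pyGetD grid ((n : Int) - 1) []).take m :=
      PySem.List.slice_to_natCast _ _
    have hm' : m = r0.length := by rw [hm, hhead]
    simp only [object_perimeter_alt, if_neg hne, hhead, hslice, hsliceLast,
      PySem.List.slice_to_natCast, ← hm', ← hn]
    rw [if_neg hm0, if_pos (by omega : 1 < n)]
  rw [hAsum, hB]
  have hfold : ∀ (l : List (List Int)) (init : Int),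
      l.foldl (fun total row =>
        let t := if PySem.List.pyGetD row 0 0 != bgv then total + 1 else total
        if 1 < m ∧ PySem.List.pyGetD row ((m : Int) - 1) 0 != bgv then t + 1 else t) init
      = init + (l.map (pv_edge bgv m)).sum := by
    intro l init
    have : l.foldl (fun total row =>
        let t := if PySem.List.pyGetD row 0 0 != bgv then total + 1 else total
        if 1 < m ∧ PySem.List.pyGetD row ((m : Int) - 1) 0 != bgv then t + 1 else t) init
        = l.foldl (fun total row => total + pv_edge bgv m row) init := by
      apply PySem.List.foldl_congr_mem
      intro acc row _
      exact alt_middle_step bgv m acc row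
    rw [this, PySem.List.foldl_add]
  have hcomp : (PySem.List.pyRange 1 ((n : Int) - 1) 1).map
      (fun i => pv_edge bgv m (PySem.List.pyGetD grid i []))
      = ((grid.drop 1).take (n - 2)).map (pv_edge bgv m) := by
    rw [← hmidlist, List.map_map]
    simp [Function.comp_def]
  rw [hfold, ← hcomp]
  ring

-- ===== VERDICT (by name: the statement is the Claim_ definition above) =====
theorem object_perimeter_spec : Claim_equal_object_perimeter := by
  intro grid bg _ hpre
  unfold Spec_object_perimeter
  cases bg with
  | some b => exact object_perimeter_core grid b hpre
  | none =>
      have hA : object_perimeter grid none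
          = object_perimeter grid (some (background_color grid)) := rfl
      have hB : object_perimeter_alt grid none
          = object_perimeter_alt grid (some (background_color grid)) := rfl
      rw [hA, hB]
      exact object_perimeter_core grid (background_color grid) hpre
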